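-- pv_equiv track=rewrite | github.com/Sangioo/Ingegneria-Infomatica | Introduzione-alla-programmazione/Dispense/LabPython06/A_Ex10.py | A_Ex10
-- ===== SOURCE A (Python) =====
-- def A_Ex10(l):
--     ris = set()
--
--     for si in l:
--         for sj in l:
--             if si == sj:
--                 continue
--             elif len(si) == len(sj):
--                 ris.add((si,sj))
--
--     return ris
-- ===== SOURCE B (Python) =====
-- def A_Ex10(l):
--     # One pass: collect the distinct strings in first-occurrence order and
--     # group them by length; then emit ordered pairs only within each length group.
--     groups = {}
--     order = []
--     seen = set()
--     for s in l:
--         if s not in seen: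
--             seen.add(s)
--             order.append(s)
--             groups.setdefault(len(s), []).append(s)
--     return {(x, y) for x in order for y in groups[len(x)] if y != x}
-- ===== Notes on version B (the rewrite author's own statement) =====
-- stated objective: alternative
-- what changed: Instead of comparing every pair of list entries with a nested double scan, B makes one pass that deduplicates the strings and buckets them by length in a dict, then emits ordered pairs only within each length bucket (O(n + output) work; on a timing run's duplicate-heavy inputs the output term dominates, so a timing run did not confirm a speed-up).
import Mathlib
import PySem

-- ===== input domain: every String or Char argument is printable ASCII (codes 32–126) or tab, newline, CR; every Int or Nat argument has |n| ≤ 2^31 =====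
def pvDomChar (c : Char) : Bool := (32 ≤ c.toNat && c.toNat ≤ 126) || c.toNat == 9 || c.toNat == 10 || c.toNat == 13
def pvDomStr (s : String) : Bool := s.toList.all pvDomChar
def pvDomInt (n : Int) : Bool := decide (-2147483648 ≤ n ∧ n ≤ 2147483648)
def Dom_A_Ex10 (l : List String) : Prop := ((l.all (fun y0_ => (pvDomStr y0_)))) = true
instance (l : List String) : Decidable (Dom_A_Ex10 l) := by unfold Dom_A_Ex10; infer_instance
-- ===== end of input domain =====

-- B replaces A's all-pairs double scan by a single deduplicating pass that buckets
-- the distinct strings by length, emitting pairs only within a bucket (objective: alternative).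

-- ===== PORT A =====
def A_Ex10 (l : List String) : List (String × String) :=
  l.foldl (fun ris si =>
    l.foldl (fun ris sj =>
      if si == sj then ris
      else if PySem.Str.len si == PySem.Str.len sj then PySem.Set.add ris (si, sj)
      else ris) ris) PySem.Set.empty

-- ===== PORT B =====
-- one loop iteration of Source B: skip already-seen strings, otherwise record the string
-- in its length bucket (groups), in the first-occurrence order list, and in seen
def bStep (st : PySem.Dict Int (List String) × List String × PySem.Set String) (s : String) :
    PySem.Dict Int (List String) × List String × PySem.Set String :=
  if PySem.Set.contains st.2.2 s then st
  else (st.1.insert (PySem.Str.len s) (st.1.getD (PySem.Str.len s) [] ++ [s]),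
        st.2.1 ++ [s],
        PySem.Set.add st.2.2 s)

def A_Ex10_alt (l : List String) : List (String × String) :=
  let st := l.foldl bStep (PySem.Dict.empty, [], PySem.Set.empty)
  PySem.Set.ofList (st.2.1.flatMap (fun x =>
    ((st.1.getD (PySem.Str.len x) []).filter (fun y => !(y == x))).map (fun y => (x, y))))

-- ===== PRECONDITION & SPEC =====
def Spec_A_Ex10 (l : List String) (out : List (String × String)) : Prop := out = A_Ex10_alt l
instance (l : List String) (out : List (String × String)) : Decidable (Spec_A_Ex10 l out) := by unfold Spec_A_Ex10; infer_instance

-- ===== CLAIM (what is proved, stated in full; the proofs are below) =====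
def Claim_equal_A_Ex10 : Prop := ∀ (l : List String), Dom_A_Ex10 l → Spec_A_Ex10 l (A_Ex10 l)

-- ===== LEMMAS AND PROOFS =====

-- adding a list of already-present elements to a set is a no-op
theorem pv_update_of_subset {α : Type} [BEq α] [LawfulBEq α] :
    ∀ (xs : List α) (s : PySem.Set α), (∀ y ∈ xs, y ∈ s) → PySem.Set.update s xs = s := by
  intro xs
  induction xs with
  | nil => intro s _; rfl
  | cons a t ih =>
    intro s h
    have ha : PySem.Set.add s a = s := PySem.Set.add_of_mem (h a (by simp))
    show PySem.Set.update (PySem.Set.add s a) t = s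
    rw [ha]; exact ih s (fun y hy => h y (by simp [hy]))

-- updating past a prefix disjoint from the new elements
theorem pv_update_append_left {α : Type} [BEq α] [LawfulBEq α] :
    ∀ (xs : List α) (s u : PySem.Set α), (∀ y ∈ xs, ¬ y ∈ s) →
      PySem.Set.update (s ++ u) xs = s ++ PySem.Set.update u xs := by
  intro xs
  induction xs with
  | nil => intro s u _; rfl
  | cons a t ih =>
    intro s u h
    have hna : a ∉ s := h a (by simp)
    have hadd : PySem.Set.add (s ++ u) a = s ++ PySem.Set.add u a := by
      by_cases hu : a ∈ u
      · rw [PySem.Set.add_of_mem (by simp [hu]), PySem.Set.add_of_mem hu]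
      · rw [PySem.Set.add_of_not_mem (by simp [hna, hu]), PySem.Set.add_of_not_mem hu,
          List.append_assoc]
    show PySem.Set.update (PySem.Set.add (s ++ u) a) t = s ++ PySem.Set.update (PySem.Set.add u a) t
    rw [hadd]
    exact ih s _ (fun y hy => h y (by simp [hy]))

-- updating a set with fresh elements appends their dedup
theorem pv_update_disjoint {α : Type} [BEq α] [LawfulBEq α]
    (xs : List α) (s : PySem.Set α) (h : ∀ y ∈ xs, ¬ y ∈ s) :
    PySem.Set.update s xs = s ++ PySem.List.dedup xs := by
  have := pv_update_append_left xs s [] h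
  simpa [PySem.List.dedup, PySem.Set.ofList, PySem.Set.update, PySem.Set.empty] using this

-- an update only ever appends
theorem pv_update_exists_append {α : Type} [BEq α] [LawfulBEq α] :
    ∀ (xs : List α) (s : PySem.Set α), ∃ r, PySem.Set.update s xs = s ++ r := by
  intro xs
  induction xs with
  | nil => intro s; exact ⟨[], by simp [PySem.Set.update]⟩
  | cons a t ih =>
    intro s
    show ∃ r, PySem.Set.update (PySem.Set.add s a) t = s ++ r
    by_cases hm : a ∈ s
    · rw [PySem.Set.add_of_mem hm]; exact ih s
    · rw [PySem.Set.add_of_not_mem hm]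
      obtain ⟨r, hr⟩ := ih (s ++ [a])
      exact ⟨a :: r, by simpa using hr⟩

-- dedup of a Nodup list is itself (via the generalized update form)
theorem pv_update_of_nodup {α : Type} [BEq α] [LawfulBEq α] :
    ∀ (xs : List α) (s : PySem.Set α), (s ++ xs).Nodup → PySem.Set.update s xs = s ++ xs := by
  intro xs
  induction xs with
  | nil => intro s _; simp [PySem.Set.update]
  | cons a t ih =>
    intro s h
    have hna : a ∉ s := by
      intro hin
      rw [List.nodup_append] at h
      exact h.2.2 a hin a (by simp) rfl
    show PySem.Set.update (PySem.Set.add s a) t = s ++ a :: t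
    rw [PySem.Set.add_of_not_mem hna]
    have := ih (s ++ [a]) (by simpa using h)
    simpa using this

theorem pv_ofList_of_nodup {α : Type} [BEq α] [LawfulBEq α]
    (xs : List α) (h : xs.Nodup) : PySem.Set.ofList xs = xs := by
  have := pv_update_of_nodup xs [] (by simpa using h)
  simpa [PySem.Set.ofList, PySem.Set.update, PySem.Set.empty] using this

-- filter commutes with Set.add
theorem pv_filter_add {α : Type} [BEq α] [LawfulBEq α] (s : PySem.Set α) (x : α) (p : α → Bool) :
    (PySem.Set.add s x).filter p = if p x then PySem.Set.add (s.filter p) x else s.filter p := by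
  by_cases hm : x ∈ s
  · rw [PySem.Set.add_of_mem hm]
    by_cases hp : p x
    · rw [if_pos hp, PySem.Set.add_of_mem (List.mem_filter.2 ⟨hm, hp⟩)]
    · rw [if_neg hp]
  · rw [PySem.Set.add_of_not_mem hm, List.filter_append]
    by_cases hp : p x
    · rw [if_pos hp, PySem.Set.add_of_not_mem (fun hc => hm (List.mem_filter.1 hc).1)]
      simp [hp]
    · rw [if_neg hp]; simp [hp]

-- filter commutes with Set.update / ofList / dedup
theorem pv_filter_update {α : Type} [BEq α] [LawfulBEq α] (p : α → Bool) :
    ∀ (xs : List α) (s : PySem.Set α),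
      (PySem.Set.update s xs).filter p = PySem.Set.update (s.filter p) (xs.filter p) := by
  intro xs
  induction xs with
  | nil => intro s; rfl
  | cons a t ih =>
    intro s
    show (PySem.Set.update (PySem.Set.add s a) t).filter p = _
    rw [ih]
    by_cases hp : p a
    · simp only [List.filter_cons, hp, pv_filter_add, if_pos]
      rfl
    · simp only [List.filter_cons, hp, pv_filter_add]
      simp

theorem pv_dedup_filter {α : Type} [BEq α] [LawfulBEq α] (p : α → Bool) (xs : List α) :
    PySem.List.dedup (xs.filter p) = (PySem.List.dedup xs).filter p := by
  have := (pv_filter_update p xs []).symm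
  simpa [PySem.List.dedup, PySem.Set.ofList, PySem.Set.update, PySem.Set.empty] using this

-- mapping an injective function commutes with Set.add / update / dedup
theorem pv_map_add {α β : Type} [BEq α] [LawfulBEq α] [BEq β] [LawfulBEq β]
    (f : α → β) (hf : Function.Injective f) (s : PySem.Set α) (x : α) :
    (PySem.Set.add s x).map f = PySem.Set.add (s.map f) (f x) := by
  by_cases hm : x ∈ s
  · rw [PySem.Set.add_of_mem hm, PySem.Set.add_of_mem (List.mem_map_of_mem hm)]
  · rw [PySem.Set.add_of_not_mem hm, PySem.Set.add_of_not_mem (by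
      intro hc
      obtain ⟨y, hy, hyx⟩ := List.mem_map.1 hc
      exact hm (hf hyx ▸ hy)), List.map_append]
    rfl

theorem pv_map_update {α β : Type} [BEq α] [LawfulBEq α] [BEq β] [LawfulBEq β]
    (f : α → β) (hf : Function.Injective f) :
    ∀ (xs : List α) (s : PySem.Set α),
      (PySem.Set.update s xs).map f = PySem.Set.update (s.map f) (xs.map f) := by
  intro xs
  induction xs with
  | nil => intro s; rfl
  | cons a t ih =>
    intro s
    show (PySem.Set.update (PySem.Set.add s a) t).map f = _
    rw [ih, pv_map_add f hf]
    rfl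

theorem pv_dedup_map {α β : Type} [BEq α] [LawfulBEq α] [BEq β] [LawfulBEq β]
    (f : α → β) (hf : Function.Injective f) (xs : List α) :
    PySem.List.dedup (xs.map f) = (PySem.List.dedup xs).map f := by
  have := (pv_map_update f hf xs []).symm
  simpa [PySem.List.dedup, PySem.Set.ofList, PySem.Set.update, PySem.Set.empty] using this

-- A's inner loop is a conditional-filtered Set.update
theorem pv_innerA (si : String) :
    ∀ (m : List String) (ris : PySem.Set (String × String)),
      m.foldl (fun ris sj =>
          if si == sj then ris
          else if PySem.Str.len si == PySem.Str.len sj then PySem.Set.add ris (si, sj)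
          else ris) ris
        = PySem.Set.update ris
            ((m.filter (fun sj => !(si == sj) && (PySem.Str.len si == PySem.Str.len sj))).map
              (fun sj => (si, sj))) := by
  intro m
  induction m with
  | nil => intro ris; rfl
  | cons a t ih =>
    intro ris
    rw [List.foldl_cons, List.filter_cons]
    by_cases h1 : si = a
    · rw [if_pos (beq_iff_eq.mpr h1)]
      rw [show (!(si == a) && (PySem.Str.len si == PySem.Str.len a)) = false by
        rw [beq_iff_eq.mpr h1]; rfl]
      rw [if_neg Bool.false_ne_true]
      exact ih ris
    · have e1 : (si == a) = false := beq_eq_false_iff_ne.mpr h1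
      rw [if_neg (by rw [e1]; exact Bool.false_ne_true)]
      by_cases h2 : PySem.Str.len si = PySem.Str.len a
      · have e2 : (PySem.Str.len si == PySem.Str.len a) = true := beq_iff_eq.mpr h2
        rw [if_pos e2]
        rw [show (!(si == a) && (PySem.Str.len si == PySem.Str.len a)) = true by
          rw [e1, e2]; rfl]
        rw [if_pos rfl, List.map_cons]
        exact ih (PySem.Set.add ris (si, a))
      · have e2 : (PySem.Str.len si == PySem.Str.len a) = false := beq_eq_false_iff_ne.mpr h2
        rw [if_neg (by rw [e2]; exact Bool.false_ne_true)]
        rw [show (!(si == a) && (PySem.Str.len si == PySem.Str.len a)) = false by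
          rw [e1, e2]; rfl]
        rw [if_neg Bool.false_ne_true]
        exact ih ris

-- folding block-updates over a list equals folding over its dedup
theorem pv_foldl_update_dedup_gen {α β : Type} [BEq α] [LawfulBEq α] [BEq β] [LawfulBEq β]
    (f : α → List β) :
    ∀ (l : List α) (seen : List α) (s : PySem.Set β),
      (∀ x ∈ seen, ∀ y ∈ f x, y ∈ s) →
      l.foldl (fun s x => PySem.Set.update s (f x)) s
        = ((PySem.Set.update seen l).drop seen.length).foldl
            (fun s x => PySem.Set.update s (f x)) s := by
  intro l
  induction l with
  | nil => intro seen s _; simp [PySem.Set.update]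
  | cons a t ih =>
    intro seen s h
    by_cases hm : a ∈ seen
    · have hfa : PySem.Set.update s (f a) = s := pv_update_of_subset _ s (h a hm)
      show t.foldl _ (PySem.Set.update s (f a)) =
        ((PySem.Set.update (PySem.Set.add seen a) t).drop seen.length).foldl _ s
      rw [hfa, PySem.Set.add_of_mem hm]
      exact ih seen s h
    · show t.foldl _ (PySem.Set.update s (f a)) =
        ((PySem.Set.update (PySem.Set.add seen a) t).drop seen.length).foldl _ s
      rw [PySem.Set.add_of_not_mem hm]
      obtain ⟨r, hr⟩ := pv_update_exists_append t (seen ++ [a])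
      have hdrop1 : (PySem.Set.update (seen ++ [a]) t).drop seen.length = a :: r := by
        rw [hr, List.append_assoc]
        simpa using List.drop_left (l₁ := seen) (l₂ := [a] ++ r)
      have hdrop2 : (PySem.Set.update (seen ++ [a]) t).drop (seen ++ [a]).length = r := by
        rw [hr]; exact List.drop_left
      have ihp := ih (seen ++ [a]) (PySem.Set.update s (f a)) (by
        intro x hx y hy
        rcases List.mem_append.1 hx with hx | hx
        · exact (PySem.Set.mem_update s (f a) y).2 (Or.inl (h x hx y hy))
        · have : x = a := by simpa using hx
          exact (PySem.Set.mem_update s (f a) y).2 (Or.inr (this ▸ hy)))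
      rw [ihp, hdrop1, hdrop2]
      rfl

-- the blocks version: folding updates of per-element blocks builds the flat list
theorem pv_foldl_update_blocks {α β : Type} [BEq α] [LawfulBEq α] [BEq β] [LawfulBEq β]
    (gl gd : α → List β) :
    ∀ (L : List α) (s : PySem.Set β),
      (∀ x ∈ L, PySem.List.dedup (gl x) = gd x) →
      (s ++ L.flatMap gd).Nodup →
      L.foldl (fun s x => PySem.Set.update s (gl x)) s = s ++ L.flatMap gd := by
  intro L
  induction L with
  | nil => intro s _ _; simp
  | cons a t ih =>
    intro s hg hn
    have hdis : ∀ y ∈ gl a, ¬ y ∈ s := by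
      intro y hy hys
      have hyd : y ∈ gd a := by
        rw [← hg a (by simp)]
        exact (PySem.List.mem_dedup _ y).2 hy
      have : (s ++ (gd a ++ t.flatMap gd)).Nodup := by simpa using hn
      rw [List.nodup_append] at this
      exact this.2.2 y hys y (by simp [hyd]) rfl
    have hstep : PySem.Set.update s (gl a) = s ++ gd a := by
      rw [pv_update_disjoint _ s hdis, hg a (by simp)]
    show t.foldl _ (PySem.Set.update s (gl a)) = _
    rw [hstep, ih (s ++ gd a) (fun x hx => hg x (by simp [hx])) (by simpa using hn)]
    simp

-- Nodup of a flatMap whose blocks are tagged by their origin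
theorem pv_nodup_flatMap_tagged {α β : Type} (tag : β → α) :
    ∀ (d : List α) (f : α → List β), d.Nodup → (∀ x ∈ d, (f x).Nodup) →
      (∀ x ∈ d, ∀ b ∈ f x, tag b = x) → (d.flatMap f).Nodup := by
  intro d
  induction d with
  | nil => intro f _ _ _; simp
  | cons a t ih =>
    intro f hd h1 h2
    rw [List.flatMap_cons, List.nodup_append]
    refine ⟨h1 a (by simp), ih f (List.nodup_cons.1 hd).2
      (fun x hx => h1 x (by simp [hx])) (fun x hx => h2 x (by simp [hx])), ?_⟩
    intro b hb c hc heq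
    obtain ⟨x, hx, hcx⟩ := List.mem_flatMap.1 hc
    have e1 : tag b = a := h2 a (by simp) b hb
    have e2 : tag c = x := h2 x (by simp [hx]) c hcx
    have hax : a = x := by rw [← e1, heq, e2]
    exact (List.nodup_cons.1 hd).1 (hax ▸ hx)

-- B's loop: the order/seen components track the dedup, and each bucket is the
-- length-filter of the order list
theorem pv_bLoop :
    ∀ (l : List String) (groups : PySem.Dict Int (List String)) (order : List String),
      (∀ k, groups.getD k [] = order.filter (fun y => PySem.Str.len y == k)) →
      ∃ g, l.foldl bStep (groups, order, order)
            = (g, PySem.Set.update order l, PySem.Set.update order l)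
        ∧ ∀ k, g.getD k [] = (PySem.Set.update order l).filter (fun y => PySem.Str.len y == k) := by
  intro l
  induction l with
  | nil =>
    intro groups order h
    exact ⟨groups, by simp [PySem.Set.update], fun k => by simpa [PySem.Set.update] using h k⟩
  | cons a t ih =>
    intro groups order h
    by_cases hm : a ∈ order
    · have hstep : bStep (groups, order, order) a = (groups, order, order) := by
        simp [bStep, hm]
      have hupd : PySem.Set.update order (a :: t) = PySem.Set.update order t := by
        show PySem.Set.update (PySem.Set.add order a) t = _
        rw [PySem.Set.add_of_mem hm]
      rw [List.foldl_cons, hstep, hupd]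
      exact ih groups order h
    · have hstep : bStep (groups, order, order) a
          = (groups.insert (PySem.Str.len a) (groups.getD (PySem.Str.len a) [] ++ [a]),
             order ++ [a], order ++ [a]) := by
        simp [bStep, hm]
      have hupd : PySem.Set.update order (a :: t) = PySem.Set.update (order ++ [a]) t := by
        show PySem.Set.update (PySem.Set.add order a) t = _
        rw [PySem.Set.add_of_not_mem hm]
      rw [List.foldl_cons, hstep, hupd]
      refine ih _ (order ++ [a]) ?_
      intro k
      rw [PySem.Dict.getD_insert, List.filter_append, ← h k]
      by_cases hk : k = PySem.Str.len a
      · rw [if_pos hk, hk]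
        simp [List.filter]
      · rw [if_neg hk]
        have hfa : (PySem.Str.len a == k) = false :=
          beq_eq_false_iff_ne.mpr (fun hc => hk hc.symm)
        rw [show List.filter (fun y => PySem.Str.len y == k) [a] = [] by
          rw [List.filter_cons, hfa]; rfl]
        simp

-- the common normal form of both ports
-- the common block of distinct pairs emitted for a given x
theorem pv_nodup_blocks (l : List String) :
    ((PySem.List.dedup l).flatMap (fun x =>
      (((PySem.List.dedup l).filter (fun y => PySem.Str.len y == PySem.Str.len x)).filter
          (fun y => !(y == x))).map (fun y => (x, y)))).Nodup := by
  apply pv_nodup_flatMap_tagged Prod.fst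
  · exact PySem.List.nodup_dedup l
  · intro x _
    exact (((PySem.List.nodup_dedup l).filter _).filter _).map
      (fun a b h => congrArg Prod.snd h)
  · intro x _ b hb
    obtain ⟨y, _, rfl⟩ := List.mem_map.1 hb
    rfl

theorem pv_A_eq_flat (l : List String) :
    A_Ex10 l = (PySem.List.dedup l).flatMap (fun x =>
      (((PySem.List.dedup l).filter (fun y => PySem.Str.len y == PySem.Str.len x)).filter
          (fun y => !(y == x))).map (fun y => (x, y))) := by
  show l.foldl _ PySem.Set.empty = _
  have hfn : (fun (ris : PySem.Set (String × String)) si =>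
      l.foldl (fun ris sj =>
        if si == sj then ris
        else if PySem.Str.len si == PySem.Str.len sj then PySem.Set.add ris (si, sj)
        else ris) ris)
    = fun ris si => PySem.Set.update ris
        ((l.filter (fun sj => !(si == sj) && (PySem.Str.len si == PySem.Str.len sj))).map
          (fun sj => (si, sj))) :=
    funext fun ris => funext fun si => pv_innerA si l ris
  rw [hfn]
  have hded := pv_foldl_update_dedup_gen
    (fun si => (l.filter (fun sj => !(si == sj) && (PySem.Str.len si == PySem.Str.len sj))).map
      (fun sj => (si, sj))) l [] PySem.Set.empty (by intro x hx; simp at hx)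
  simp only [List.length_nil, List.drop_zero] at hded
  have hupd0 : PySem.Set.update ([] : List String) l = PySem.List.dedup l := by
    simp [PySem.List.dedup, PySem.Set.ofList, PySem.Set.update, PySem.Set.empty]
  rw [hupd0] at hded
  rw [hded]
  have hblocks := pv_foldl_update_blocks
    (fun si => (l.filter (fun sj => !(si == sj) && (PySem.Str.len si == PySem.Str.len sj))).map
      (fun sj => (si, sj)))
    (fun x => (((PySem.List.dedup l).filter (fun y => PySem.Str.len y == PySem.Str.len x)).filter
          (fun y => !(y == x))).map (fun y => (x, y)))
    (PySem.List.dedup l) PySem.Set.empty ?_ ?_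
  · simpa [PySem.Set.empty] using hblocks
  · intro x _
    beta_reduce
    rw [pv_dedup_map (fun sj => (x, sj)) (fun a b h => congrArg Prod.snd h),
      pv_dedup_filter, List.filter_filter]
    congr 1
    apply List.filter_congr
    intro y _
    by_cases hxy : x = y
    · simp [beq_iff_eq.mpr hxy, beq_iff_eq.mpr hxy.symm]
    · rw [beq_eq_false_iff_ne.mpr hxy, beq_eq_false_iff_ne.mpr (Ne.symm hxy)]
      by_cases hl : PySem.Str.len x = PySem.Str.len y
      · rw [beq_iff_eq.mpr hl, beq_iff_eq.mpr hl.symm]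
      · rw [beq_eq_false_iff_ne.mpr hl, beq_eq_false_iff_ne.mpr (Ne.symm hl)]
  · simpa [PySem.Set.empty] using pv_nodup_blocks l

theorem pv_B_eq_flat (l : List String) :
    A_Ex10_alt l = (PySem.List.dedup l).flatMap (fun x =>
      (((PySem.List.dedup l).filter (fun y => PySem.Str.len y == PySem.Str.len x)).filter
          (fun y => !(y == x))).map (fun y => (x, y))) := by
  obtain ⟨g, hst, hg⟩ := pv_bLoop l PySem.Dict.empty []
    (fun k => by simp [PySem.Dict.getD, PySem.Dict.empty, PySem.Dict.get?])
  have hupd0 : PySem.Set.update ([] : List String) l = PySem.List.dedup l := by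
    simp [PySem.List.dedup, PySem.Set.ofList, PySem.Set.update, PySem.Set.empty]
  rw [hupd0] at hst hg
  show PySem.Set.ofList ((l.foldl bStep (PySem.Dict.empty, [], PySem.Set.empty)).2.1.flatMap _) = _
  have hse : (PySem.Set.empty : PySem.Set String) = ([] : List String) := rfl
  rw [hse, hst]
  have hfn : (fun x => (((g.getD (PySem.Str.len x) []).filter (fun y => !(y == x))).map
        (fun y => (x, y))))
      = fun x => (((PySem.List.dedup l).filter (fun y => PySem.Str.len y == PySem.Str.len x)).filter
          (fun y => !(y == x))).map (fun y => (x, y)) :=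
    funext fun x => by rw [hg (PySem.Str.len x)]
  show PySem.Set.ofList ((PySem.List.dedup l).flatMap _) = _
  rw [hfn]
  exact pv_ofList_of_nodup _ (pv_nodup_blocks l)

-- ===== VERDICT (by name: the statement is the Claim_ definition above) =====
theorem A_Ex10_spec : Claim_equal_A_Ex10 := by
  intro l _
  show A_Ex10 l = A_Ex10_alt l
  rw [pv_A_eq_flat, pv_B_eq_flat]
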